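-- pv_equiv track=rewrite | github.com/mauro-nievoff/MultiCaRe_Dataset | multiversity_library/multi_labeler.py | _check_label_requirements
-- ===== SOURCE A (Python) =====
-- def _check_label_requirements(label_list, checked_label_group = [], required_label_group = []):
--
--   '''
--   Method used to remove labels if a given label list does not include any of the labels from the required group.
--   label_list (list): list of labels.
--   checked_label_group (list): list of labels that will be checked.
--   required_label_group (list): list of labels that must be included (at least one) in order to keep the checked label.
--   '''
--   new_list = []
--
--   met_requirement = False
--   for l in label_list:
--     if l in required_label_group:
--       met_requirement = True
--
--   for l in label_list:
--     if (l not in checked_label_group) or met_requirement: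
--       new_list.append(l)
--
--   return new_list
-- ===== SOURCE B (Python) =====
-- def _check_label_requirements(label_list, checked_label_group = [], required_label_group = []):
--   # Single pass with dual accumulators: build both candidate outputs (the full
--   # copy and the filtered list) while scanning once, and pick one at the end.
--   kept = []
--   filtered = []
--   met = False
--   for l in label_list:
--     kept.append(l)
--     if l in required_label_group:
--       met = True
--     if l not in checked_label_group:
--       filtered.append(l)
--   return kept if met else filtered
-- ===== Notes on version B (the rewrite author's own statement) =====
-- stated objective: alternative
-- what changed: B makes a single pass with dual accumulators, building the full copy and the checked-group-filtered list simultaneously and selecting one at the end, instead of A's two staged scans (flag scan, then a conditional filtering scan whose predicate consults the flag).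
import Mathlib
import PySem

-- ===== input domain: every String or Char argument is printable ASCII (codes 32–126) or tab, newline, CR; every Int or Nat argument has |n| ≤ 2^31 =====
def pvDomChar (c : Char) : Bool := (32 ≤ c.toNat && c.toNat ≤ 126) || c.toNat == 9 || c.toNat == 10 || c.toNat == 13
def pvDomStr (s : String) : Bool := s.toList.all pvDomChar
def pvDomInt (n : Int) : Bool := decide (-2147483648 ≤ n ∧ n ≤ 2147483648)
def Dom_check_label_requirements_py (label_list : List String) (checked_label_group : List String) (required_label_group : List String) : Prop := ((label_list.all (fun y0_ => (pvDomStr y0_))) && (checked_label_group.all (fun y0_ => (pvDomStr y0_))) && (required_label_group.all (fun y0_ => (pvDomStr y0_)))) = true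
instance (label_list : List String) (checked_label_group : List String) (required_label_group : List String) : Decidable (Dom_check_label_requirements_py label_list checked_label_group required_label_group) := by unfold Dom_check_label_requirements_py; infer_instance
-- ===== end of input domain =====

-- B: one pass with dual accumulators (full copy + filtered list), selected at the end,
-- instead of A's two staged scans; same return value, same cost (objective: alternative).
-- ===== PORT A =====
def check_label_requirements_py (label_list : List String) (checked_label_group : List String) (required_label_group : List String) : List String :=
  let met_requirement := label_list.foldl (fun m l => if required_label_group.contains l then true else m) false
  label_list.foldl (fun new_list l => if (!checked_label_group.contains l) || met_requirement then new_list ++ [l] else new_list) []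

-- ===== PORT B =====
def check_label_requirements_py_alt (label_list : List String) (checked_label_group : List String) (required_label_group : List String) : List String :=
  let s := label_list.foldl
    (fun (st : List String × List String × Bool) l =>
      (st.1 ++ [l],
       (if !checked_label_group.contains l then st.2.1 ++ [l] else st.2.1),
       (if required_label_group.contains l then true else st.2.2)))
    ([], [], false)
  if s.2.2 then s.1 else s.2.1

-- ===== PRECONDITION & SPEC =====
def Spec_check_label_requirements_py (label_list : List String) (checked_label_group : List String) (required_label_group : List String) (out : List String) : Prop := out = check_label_requirements_py_alt label_list checked_label_group required_label_group
instance (label_list : List String) (checked_label_group : List String) (required_label_group : List String) (out : List String) : Decidable (Spec_check_label_requirements_py label_list checked_label_group required_label_group out) := by unfold Spec_check_label_requirements_py; infer_instance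

-- ===== CLAIM (what is proved, stated in full; the proofs are below) =====
def Claim_equal_check_label_requirements_py : Prop := ∀ (label_list : List String) (checked_label_group : List String) (required_label_group : List String), Dom_check_label_requirements_py label_list checked_label_group required_label_group → Spec_check_label_requirements_py label_list checked_label_group required_label_group (check_label_requirements_py label_list checked_label_group required_label_group)

-- ===== LEMMAS AND PROOFS =====

lemma foldl_or_eq_any (ll rg : List String) :
    ll.foldl (fun m l => if rg.contains l then true else m) false = ll.any (fun l => rg.contains l) := by
  have h : ∀ b, ll.foldl (fun m l => if rg.contains l then true else m) b
      = (b || ll.any (fun l => rg.contains l)) := by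
    induction ll with
    | nil => simp [List.foldl]
    | cons x xs ih =>
      intro b
      simp only [List.foldl, List.any_cons, ih]
      cases hx : rg.contains x <;> simp [hx, Bool.or_left_comm]
  simpa using h false

-- invariant of B's single pass: the state is (copy so far, filtered so far, met so far)
lemma alt_foldl_state (ll cg rg : List String) (k f : List String) (m : Bool) :
    ll.foldl
      (fun (st : List String × List String × Bool) l =>
        (st.1 ++ [l],
         (if !cg.contains l then st.2.1 ++ [l] else st.2.1),
         (if rg.contains l then true else st.2.2)))
      (k, f, m)
    = (k ++ ll, f ++ ll.filter (fun l => !cg.contains l), m || ll.any (fun l => rg.contains l)) := by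
  induction ll generalizing k f m with
  | nil => simp
  | cons x xs ih =>
    simp only [List.foldl, ih, List.filter_cons, List.any_cons]
    cases hc : cg.contains x <;> cases hr : rg.contains x <;>
      simp [hc, hr, Bool.or_left_comm]


-- ===== VERDICT (by name: the statement is the Claim_ definition above) =====
theorem check_label_requirements_py_spec : Claim_equal_check_label_requirements_py := by
  intro ll cg rg _
  unfold Spec_check_label_requirements_py check_label_requirements_py check_label_requirements_py_alt
  rw [foldl_or_eq_any, alt_foldl_state]
  simp only [List.nil_append]
  cases h : ll.any (fun l => rg.contains l) with
  | true =>
    simp [Bool.or_true, PySem.List.foldl_append_eq_flatMap (g := fun l : String => [l])]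
  | false =>
    simp only [Bool.or_false, Bool.false_or]
    rw [if_neg (by decide), PySem.List.foldl_append_if_eq_filter]
    simp
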